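-- pv_equiv track=rewrite | github.com/YashTayal04/DSA-Questions | DP/maximumSum.py | solve
-- ===== SOURCE A (Python) =====
-- def solve(A, B, C, D):
--     dp=[(A[0]*B,A[0]*(B+C),A[0]*(B+C+D))]
--     for i in range(1,len(A)):
--         dp.append([0,0,0])
--         dp[-1][0]=max(dp[-2][0],A[i]*B)
--         dp[-1][1]=max(dp[-2][1],dp[-1][0]+A[i]*C)
--         dp[-1][2]=max(dp[-2][2],dp[-1][1]+A[i]*D)
--     return dp[-1][2]
-- ===== SOURCE B (Python) =====
-- def prefix_max(vals):
--     out = []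
--     for v in vals:
--         out.append(v if not out else max(out[-1], v))
--     return out
--
-- def solve(A, B, C, D):
--     first = prefix_max([x * B for x in A])
--     second = prefix_max([f + x * C for f, x in zip(first, A)])
--     third = prefix_max([s + x * D for s, x in zip(second, A)])
--     return third[-1]
-- ===== Notes on version B (the rewrite author's own statement) =====
-- stated objective: alternative
-- what changed: Replaces the single fused DP pass maintaining a list of triples with three sequential whole-array prefix-maximum passes (first coefficient, then second stacked on first, then third stacked on second).
import Mathlib
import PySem

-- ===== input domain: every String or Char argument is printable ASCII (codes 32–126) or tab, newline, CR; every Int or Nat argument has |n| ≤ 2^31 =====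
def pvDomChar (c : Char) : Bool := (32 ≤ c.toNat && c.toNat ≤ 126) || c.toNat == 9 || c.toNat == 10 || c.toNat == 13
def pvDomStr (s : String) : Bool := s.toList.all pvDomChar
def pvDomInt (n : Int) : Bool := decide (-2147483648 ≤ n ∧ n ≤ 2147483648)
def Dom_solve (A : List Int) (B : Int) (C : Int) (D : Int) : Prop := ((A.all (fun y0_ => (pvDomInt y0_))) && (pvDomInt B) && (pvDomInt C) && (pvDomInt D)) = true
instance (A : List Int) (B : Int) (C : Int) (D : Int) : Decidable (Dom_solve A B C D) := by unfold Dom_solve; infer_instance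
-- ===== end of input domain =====

-- B is a different decomposition of the same O(n) task: three sequential prefix-maximum
-- passes instead of A's single fused pass over a growing list of triples.

-- ===== PORT A =====
-- loop body of A: reads dp[-2] (the last triple before the append) and appends the new triple
def dpBody (B : Int) (C : Int) (D : Int) (dp : List (Int × Int × Int)) (x : Int) : List (Int × Int × Int) :=
  let prev := (PySem.List.pyGet? dp (-1)).getD (0, 0, 0)
  let f := max prev.1 (x * B)
  let s := max prev.2.1 (f + x * C)
  let t := max prev.2.2 (s + x * D)
  dp ++ [(f, s, t)]

def solve (A : List Int) (B : Int) (C : Int) (D : Int) : Int :=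
  let a0 := PySem.List.pyGetD A 0 0
  let dp0 : List (Int × Int × Int) := [(a0 * B, a0 * (B + C), a0 * (B + C + D))]
  let dp := (PySem.List.pyRange 1 (A.length : Int) 1).foldl
    (fun dp i => dpBody B C D dp (PySem.List.pyGetD A i 0)) dp0
  ((PySem.List.pyGet? dp (-1)).getD (0, 0, 0)).2.2

-- ===== PORT B =====
-- loop body of prefix_max: out.append(v if not out else max(out[-1], v))
def pmStep (out : List Int) (v : Int) : List Int :=
  out ++ [match PySem.List.pyGet? out (-1) with
          | none => v
          | some m => max m v]

def prefixMax (vals : List Int) : List Int :=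
  vals.foldl pmStep []

def solve_alt (A : List Int) (B : Int) (C : Int) (D : Int) : Int :=
  let first := prefixMax (A.map (fun x => x * B))
  let second := prefixMax ((first.zip A).map (fun p => p.1 + p.2 * C))
  let third := prefixMax ((second.zip A).map (fun p => p.1 + p.2 * D))
  (PySem.List.pyGet? third (-1)).getD 0

-- ===== PRECONDITION & SPEC =====
-- Pre_ excludes only the empty list, on which A raises IndexError (A[0]).
def Pre_solve (A : List Int) (B : Int) (C : Int) (D : Int) : Prop := A ≠ []
instance (A : List Int) (B : Int) (C : Int) (D : Int) : Decidable (Pre_solve A B C D) := by unfold Pre_solve; infer_instance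
def pvWitness_solve : List Int × Int × Int × Int := ([1, -2, 3], 2, -1, 4)

def Spec_solve (A : List Int) (B : Int) (C : Int) (D : Int) (out : Int) : Prop := out = solve_alt A B C D
instance (A : List Int) (B : Int) (C : Int) (D : Int) (out : Int) : Decidable (Spec_solve A B C D out) := by unfold Spec_solve; infer_instance

-- ===== CLAIM (what is proved, stated in full; the proofs are below) =====
def Claim_equal_solve : Prop := ∀ (A : List Int) (B : Int) (C : Int) (D : Int), Dom_solve A B C D → Pre_solve A B C D → Spec_solve A B C D (solve A B C D)

-- ===== LEMMAS AND PROOFS =====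

-- scalar step of the shared recurrence
def stepT (B C D : Int) (st : Int × Int × Int) (x : Int) : Int × Int × Int :=
  let f := max st.1 (x * B)
  let s := max st.2.1 (f + x * C)
  let t := max st.2.2 (s + x * D)
  (f, s, t)

-- list of successive states
def scanT (B C D : Int) (st : Int × Int × Int) : List Int → List (Int × Int × Int)
  | [] => []
  | x :: xs => stepT B C D st x :: scanT B C D (stepT B C D st x) xs

-- recursive form of a prefix-maximum pass with carry c
def pmRec (c : Int) : List Int → List Int
  | [] => []
  | v :: vs => max c v :: pmRec (max c v) vs

theorem pm_foldl (vs : List Int) : ∀ (out : List Int) (c : Int), out.getLast? = some c →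
    vs.foldl pmStep out = out ++ pmRec c vs := by
  induction vs with
  | nil => intro out c _; simp [pmRec]
  | cons v vs ih =>
    intro out c h
    rw [List.foldl_cons]
    have hs : pmStep out v = out ++ [max c v] := by
      simp [pmStep, PySem.List.pyGet?_neg_one, h]
    rw [hs, ih (out ++ [max c v]) (max c v) (by simp)]
    simp [pmRec]

theorem prefixMax_cons (v : Int) (vs : List Int) :
    prefixMax (v :: vs) = v :: pmRec v vs := by
  unfold prefixMax
  rw [List.foldl_cons]
  have hs : pmStep [] v = [v] := by simp [pmStep, PySem.List.pyGet?_neg_one]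
  rw [hs]
  exact pm_foldl vs [v] v rfl

-- the three prefix passes compute exactly the components of the scan of stepT
theorem tri (B C D : Int) : ∀ (rest : List Int) (st : Int × Int × Int),
    (pmRec st.1 (rest.map (fun x => x * B)) = (scanT B C D st rest).map Prod.fst) ∧
    (pmRec st.2.1 ((((scanT B C D st rest).map Prod.fst).zip rest).map (fun p => p.1 + p.2 * C))
        = (scanT B C D st rest).map (fun q => q.2.1)) ∧
    (pmRec st.2.2 ((((scanT B C D st rest).map (fun q => q.2.1)).zip rest).map (fun p => p.1 + p.2 * D))
        = (scanT B C D st rest).map (fun q => q.2.2)) := by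
  intro rest
  induction rest with
  | nil => intro st; simp [scanT, pmRec]
  | cons x xs ih =>
    intro st
    obtain ⟨h1, h2, h3⟩ := ih (stepT B C D st x)
    refine ⟨?_, ?_, ?_⟩ <;>
      simp only [scanT, List.map_cons, pmRec, List.zip_cons_cons, stepT] <;>
      simp only [stepT] at h1 h2 h3
    · rw [h1]
    · rw [h2]
    · rw [h3]

-- last state of the scan = fold of the step
theorem scan_last (B C D : Int) : ∀ (rest : List Int) (st : Int × Int × Int),
    (st :: scanT B C D st rest).getLast? = some (rest.foldl (stepT B C D) st) := by
  intro rest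
  induction rest with
  | nil => intro st; simp [scanT]
  | cons x xs ih =>
    intro st
    simp only [scanT, List.foldl]
    rw [List.getLast?_cons_cons]
    exact ih (stepT B C D st x)

-- A's dp-list fold: only the last triple matters
theorem A_fold (B C D : Int) : ∀ (rest : List Int) (dp : List (Int × Int × Int)) (st : Int × Int × Int),
    dp.getLast? = some st →
    (rest.foldl (dpBody B C D) dp).getLast? = some (rest.foldl (stepT B C D) st) := by
  intro rest
  induction rest with
  | nil => intro dp st h; simpa using h
  | cons x xs ih =>
    intro dp st h
    rw [List.foldl_cons, List.foldl_cons]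
    have hs : dpBody B C D dp x = dp ++ [stepT B C D st x] := by
      simp [dpBody, stepT, PySem.List.pyGet?_neg_one, h]
    rw [hs]
    exact ih _ (stepT B C D st x) (by simp)

theorem solve_eq (a0 : Int) (rest : List Int) (B C D : Int) :
    solve (a0 :: rest) B C D
      = (rest.foldl (stepT B C D) (a0 * B, a0 * (B + C), a0 * (B + C + D))).2.2 := by
  show ((PySem.List.pyGet?
      ((PySem.List.pyRange 1 (((a0 :: rest).length : Int)) 1).foldl
        (fun dp i => dpBody B C D dp (PySem.List.pyGetD (a0 :: rest) i 0))
        [(PySem.List.pyGetD (a0 :: rest) 0 0 * B, PySem.List.pyGetD (a0 :: rest) 0 0 * (B + C),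
          PySem.List.pyGetD (a0 :: rest) 0 0 * (B + C + D))])
      (-1)).getD (0, 0, 0)).2.2 = _
  rw [PySem.List.foldl_pyRange_pyGetD' (a0 :: rest) 0 (dpBody B C D)
      [(PySem.List.pyGetD (a0 :: rest) 0 0 * B, PySem.List.pyGetD (a0 :: rest) 0 0 * (B + C),
        PySem.List.pyGetD (a0 :: rest) 0 0 * (B + C + D))] (a := 1) (by norm_num)]
  simp only [PySem.List.pyGetD, PySem.List.pyGet?_zero_cons, Option.getD_some,
    Int.toNat_one, List.drop_one, List.tail_cons]
  rw [PySem.List.pyGet?_neg_one, A_fold B C D rest _ (a0 * B, a0 * (B + C), a0 * (B + C + D)) rfl]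
  rfl

theorem solve_alt_eq (a0 : Int) (rest : List Int) (B C D : Int) :
    solve_alt (a0 :: rest) B C D
      = (rest.foldl (stepT B C D) (a0 * B, a0 * (B + C), a0 * (B + C + D))).2.2 := by
  obtain ⟨h1, h2, h3⟩ := tri B C D rest (a0 * B, a0 * (B + C), a0 * (B + C + D))
  simp only at h1 h2 h3
  show (PySem.List.pyGet?
      (prefixMax (((prefixMax (((prefixMax ((a0 :: rest).map (fun x => x * B))).zip
        (a0 :: rest)).map (fun p => p.1 + p.2 * C))).zip
        (a0 :: rest)).map (fun p => p.1 + p.2 * D))) (-1)).getD 0 = _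
  rw [List.map_cons, prefixMax_cons, h1, List.zip_cons_cons, List.map_cons, prefixMax_cons,
      show a0 * B + a0 * C = a0 * (B + C) by ring, h2,
      List.zip_cons_cons, List.map_cons, prefixMax_cons,
      show a0 * (B + C) + a0 * D = a0 * (B + C + D) by ring, h3]
  have hmap : (a0 * (B + C + D) :: (scanT B C D (a0 * B, a0 * (B + C), a0 * (B + C + D)) rest).map (fun q => q.2.2))
      = ((a0 * B, a0 * (B + C), a0 * (B + C + D)) :: scanT B C D (a0 * B, a0 * (B + C), a0 * (B + C + D)) rest).map (fun q => q.2.2) := by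
    simp
  rw [hmap, PySem.List.pyGet?_neg_one, List.getLast?_map, scan_last]
  rfl

-- ===== VERDICT (by name: the statement is the Claim_ definition above) =====
theorem solve_spec : Claim_equal_solve := by
  intro A B C D _ hpre
  unfold Spec_solve
  cases A with
  | nil => exact absurd rfl hpre
  | cons a0 rest => rw [solve_eq, solve_alt_eq]
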